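-- pv_equiv track=rewrite | github.com/wong-justin/melee-vision | custom_detector.py | nested_quads
-- ===== SOURCE A (Python) =====
-- def nested_quads(rect_arr, depth=1):
--     if depth == 0:
--         return rect_arr
--     else:
--         result = []
--         for rect in rect_arr:
--             result.extend(quadrants(*rect))
--         return nested_quads(result, depth-1)
--
-- def quadrants(x0, y0, x2, y2):
--     y1 = int( (y0 + y2) / 2 )
--     x1 = int( (x0 + x2) / 2 )
--     return [
--         (x0, y0, x1, y1),
--         (x1, y0, x2, y1),
--         (x0, y1, x1, y2),
--         (x1, y1, x2, y2)
--     ]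
-- ===== SOURCE B (Python) =====
-- def quadrants(x0, y0, x2, y2):
--     y1 = int( (y0 + y2) / 2 )
--     x1 = int( (x0 + x2) / 2 )
--     return [
--         (x0, y0, x1, y1),
--         (x1, y0, x2, y1),
--         (x0, y1, x1, y2),
--         (x1, y1, x2, y2)
--     ]
--
-- def nested_quads(rect_arr, depth=1):
--     result = list(rect_arr)
--     for _ in range(depth):
--         result = [q for rect in result for q in quadrants(*rect)]
--     return result
-- ===== Notes on version B (the rewrite author's own statement) =====
-- stated objective: simpler
-- what changed: Replaces the recursion on depth (each level building a list with extend) with a single iterative loop over range(depth) that rebuilds the list by a flat comprehension.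
import Mathlib
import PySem

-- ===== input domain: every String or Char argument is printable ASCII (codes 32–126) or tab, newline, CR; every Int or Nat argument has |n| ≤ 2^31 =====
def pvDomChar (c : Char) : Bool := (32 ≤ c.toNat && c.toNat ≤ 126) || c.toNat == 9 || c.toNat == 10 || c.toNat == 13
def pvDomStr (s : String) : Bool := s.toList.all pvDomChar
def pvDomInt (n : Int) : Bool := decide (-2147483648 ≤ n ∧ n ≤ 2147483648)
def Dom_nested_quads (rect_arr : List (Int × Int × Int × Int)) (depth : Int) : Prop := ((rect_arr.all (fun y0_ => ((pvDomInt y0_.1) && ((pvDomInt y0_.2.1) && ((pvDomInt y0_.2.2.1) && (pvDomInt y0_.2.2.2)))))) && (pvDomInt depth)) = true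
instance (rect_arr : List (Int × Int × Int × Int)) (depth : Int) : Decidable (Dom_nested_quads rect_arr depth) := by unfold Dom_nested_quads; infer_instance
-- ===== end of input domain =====

-- ===== PORT A =====
-- B changes the decomposition: iteration over range(depth) instead of recursion on depth; same cost.
-- int((a+b)/2) in Python: float halving is exact for |a|,|b| ≤ 2^31 and int() truncates toward zero = Int.tdiv.
def quadrantsP (x0 y0 x2 y2 : Int) : List (Int × Int × Int × Int) :=
  let y1 := (y0 + y2).tdiv 2
  let x1 := (x0 + x2).tdiv 2
  [(x0, y0, x1, y1), (x1, y0, x2, y1), (x0, y1, x1, y2), (x1, y1, x2, y2)]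

def nested_quadsGo (rect_arr : List (Int × Int × Int × Int)) : Nat → List (Int × Int × Int × Int)
  | 0 => rect_arr
  | n + 1 =>
    nested_quadsGo (rect_arr.foldl (fun acc r => acc ++ quadrantsP r.1 r.2.1 r.2.2.1 r.2.2.2) []) n

-- A recurses on depth; on negative depth Python raises RecursionError (excluded by Pre_), so the port takes depth.toNat as fuel.
def nested_quads (rect_arr : List (Int × Int × Int × Int)) (depth : Int) : List (Int × Int × Int × Int) :=
  nested_quadsGo rect_arr depth.toNat

-- ===== PORT B =====
def nested_quads_alt (rect_arr : List (Int × Int × Int × Int)) (depth : Int) : List (Int × Int × Int × Int) :=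
  (List.range depth.toNat).foldl
    (fun result _ => result.flatMap (fun r => quadrantsP r.1 r.2.1 r.2.2.1 r.2.2.2)) rect_arr

-- ===== PRECONDITION & SPEC =====
-- Pre_: A raises RecursionError for negative depth.
def Pre_nested_quads (rect_arr : List (Int × Int × Int × Int)) (depth : Int) : Prop := 0 ≤ depth
instance (rect_arr : List (Int × Int × Int × Int)) (depth : Int) : Decidable (Pre_nested_quads rect_arr depth) := by unfold Pre_nested_quads; infer_instance
def pvWitness_nested_quads : (List (Int × Int × Int × Int)) × Int := ([(0, 0, 4, 4)], 2)

def Spec_nested_quads (rect_arr : List (Int × Int × Int × Int)) (depth : Int) (out : List (Int × Int × Int × Int)) : Prop := out = nested_quads_alt rect_arr depth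
instance (rect_arr : List (Int × Int × Int × Int)) (depth : Int) (out : List (Int × Int × Int × Int)) : Decidable (Spec_nested_quads rect_arr depth out) := by unfold Spec_nested_quads; infer_instance

-- ===== CLAIM =====
def Claim_equal_nested_quads : Prop := ∀ (rect_arr : List (Int × Int × Int × Int)) (depth : Int), Dom_nested_quads rect_arr depth → Pre_nested_quads rect_arr depth → Spec_nested_quads rect_arr depth (nested_quads rect_arr depth)

-- ===== LEMMAS AND PROOFS =====
theorem foldl_extend_eq_flatMap (q : (Int × Int × Int × Int) → List (Int × Int × Int × Int))
    (rs : List (Int × Int × Int × Int)) :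
    rs.foldl (fun acc r => acc ++ q r) [] = rs.flatMap q := by
  have h : ∀ (rs : List (Int × Int × Int × Int)) (acc : List (Int × Int × Int × Int)),
      rs.foldl (fun acc r => acc ++ q r) acc = acc ++ rs.flatMap q := by
    intro rs
    induction rs with
    | nil => intro acc; simp
    | cons r t ih => intro acc; simp [List.foldl, ih, List.flatMap_cons]
  simpa using h rs []

theorem go_flatMap (n : Nat) (rs : List (Int × Int × Int × Int)) :
    nested_quadsGo (rs.flatMap (fun r => quadrantsP r.1 r.2.1 r.2.2.1 r.2.2.2)) n
      = (nested_quadsGo rs n).flatMap (fun r => quadrantsP r.1 r.2.1 r.2.2.1 r.2.2.2) := by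
  induction n generalizing rs with
  | zero => simp [nested_quadsGo]
  | succ n ih =>
    simp only [nested_quadsGo, foldl_extend_eq_flatMap]
    exact ih _

theorem go_eq_range_foldl (n : Nat) (rs : List (Int × Int × Int × Int)) :
    nested_quadsGo rs n
      = (List.range n).foldl (fun result _ => result.flatMap (fun r => quadrantsP r.1 r.2.1 r.2.2.1 r.2.2.2)) rs := by
  induction n with
  | zero => simp [nested_quadsGo]
  | succ n ih =>
    rw [List.range_succ, List.foldl_append, ← ih]
    simp only [nested_quadsGo, foldl_extend_eq_flatMap, List.foldl]
    exact go_flatMap n rs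

-- ===== VERDICT =====
theorem nested_quads_spec : Claim_equal_nested_quads := by
  intro rect_arr depth _ _
  unfold Spec_nested_quads nested_quads nested_quads_alt
  exact go_eq_range_foldl _ _
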